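-- pv_equiv track=rewrite | github.com/ScienceIsNeato/course_record_updater | src/services/dashboard_service.py | _enrich_sections_with_instructor_data
-- ===== SOURCE A (Python) =====
-- from typing import Any, Dict, List, Optional, Sequence
--
-- def _enrich_sections_with_instructor_data(
--
--     sections: List[Dict[str, Any]],
--     users: List[Dict[str, Any]],
-- ) -> List[Dict[str, Any]]:
--     """
--     Enrich sections with instructor name and email.
--
--     Args:
--         sections: List of section dictionaries
--         users: List of all users (to lookup instructor details)
--
--     Returns:
--         List of sections enriched with instructor_name and instructor_email
--     """
--     # Build instructor lookup by user_id
--     instructor_lookup = {}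
--     for user in users:
--         user_id = user.get("user_id") or user.get("id")
--         if user_id:
--             instructor_lookup[user_id] = {
--                 "name": f"{user.get('first_name', '')} {user.get('last_name', '')}".strip()
--                 or user.get("email", ""),
--                 "email": user.get("email", ""),
--             }
--
--     # Enrich sections
--     enriched_sections = []
--     for section in sections:
--         section_copy = section.copy()
--         instructor_id = section.get("instructor_id")
--
--         if instructor_id and instructor_id in instructor_lookup:
--             instructor = instructor_lookup[instructor_id]
--             section_copy["instructor_name"] = instructor["name"]
--             section_copy["instructor_email"] = instructor["email"]
--
--         enriched_sections.append(section_copy)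
--
--     return enriched_sections
-- ===== SOURCE B (Python) =====
-- from typing import Any, Dict, List
--
--
-- def _enrich_sections_with_instructor_data(
--     sections: List[Dict[str, Any]],
--     users: List[Dict[str, Any]],
-- ) -> List[Dict[str, Any]]:
--     """Enrich each section with its instructor's name/email by scanning the
--     users list directly (last matching user wins), with no prebuilt lookup."""
--
--     def effective_id(user):
--         return user.get("user_id") or user.get("id")
--
--     def enrich(section):
--         copy = section.copy()
--         instructor_id = section.get("instructor_id")
--         if not instructor_id:
--             return copy
--         match = None
--         for user in users:
--             if effective_id(user) == instructor_id:
--                 match = user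
--         if match is None:
--             return copy
--         full = f"{match.get('first_name', '')} {match.get('last_name', '')}".strip()
--         email = match.get("email", "")
--         copy["instructor_name"] = full or email
--         copy["instructor_email"] = email
--         return copy
--
--     return [enrich(s) for s in sections]
-- ===== Notes on version B (the rewrite author's own statement) =====
-- stated objective: alternative
-- what changed: B drops A's prebuilt instructor_lookup dict entirely and instead, per section, scans the users list keeping the last user whose effective id matches, computing the name/email fields on demand.
import Mathlib
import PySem

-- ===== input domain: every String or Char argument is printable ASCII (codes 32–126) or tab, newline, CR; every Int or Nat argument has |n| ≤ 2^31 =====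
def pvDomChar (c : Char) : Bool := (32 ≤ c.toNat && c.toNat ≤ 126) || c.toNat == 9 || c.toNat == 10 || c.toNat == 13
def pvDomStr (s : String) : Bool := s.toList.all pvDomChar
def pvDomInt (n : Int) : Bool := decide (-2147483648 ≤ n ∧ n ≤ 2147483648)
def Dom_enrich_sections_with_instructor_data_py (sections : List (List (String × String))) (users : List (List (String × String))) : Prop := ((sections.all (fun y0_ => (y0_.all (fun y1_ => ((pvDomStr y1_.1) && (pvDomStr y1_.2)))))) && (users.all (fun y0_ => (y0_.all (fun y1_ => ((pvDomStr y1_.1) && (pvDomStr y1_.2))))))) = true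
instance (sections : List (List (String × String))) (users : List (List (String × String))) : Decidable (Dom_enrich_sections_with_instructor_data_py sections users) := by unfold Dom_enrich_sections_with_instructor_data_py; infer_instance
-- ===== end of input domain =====

-- B replaces A's prebuilt instructor_lookup dict with a per-section last-match scan over users
-- (alternative decomposition, same observable result; not claimed faster).

-- ===== PORT A =====
-- `user.get("user_id") or user.get("id")` then truthiness: since values are strings,
-- a missing key (None) and "" are both falsy, so both collapse to the default "".
def pvUserIdA (u : List (String × String)) : String :=
  let d := PySem.Dict.mk u
  let a := d.getD "user_id" ""
  if a ≠ "" then a else d.getD "id" ""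

-- the {"name": …, "email": …} value stored in instructor_lookup, as a pair
def pvInfoA (u : List (String × String)) : String × String :=
  let d := PySem.Dict.mk u
  let full := PySem.Str.strip (d.getD "first_name" "" ++ " " ++ d.getD "last_name" "")
  let email := d.getD "email" ""
  ((if full ≠ "" then full else email), email)

def enrich_sections_with_instructor_data_py (sections : List (List (String × String))) (users : List (List (String × String))) : List (List (String × String)) :=
  -- build instructor lookup by user_id
  let instructor_lookup : PySem.Dict String (String × String) :=
    users.foldl (fun d u =>
      let user_id := pvUserIdA u
      if user_id ≠ "" then d.insert user_id (pvInfoA u) else d) PySem.Dict.empty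
  -- enrich sections
  sections.foldl (fun acc section_ =>
    let secd := PySem.Dict.mk section_
    let instructor_id := secd.getD "instructor_id" ""
    let section_copy :=
      if instructor_id ≠ "" then
        match instructor_lookup.get? instructor_id with
        | some instructor =>
            ((secd.insert "instructor_name" instructor.1).insert "instructor_email" instructor.2).items
        | none => section_
      else section_
    acc ++ [section_copy]) []

-- ===== PORT B =====
-- effective_id(user) in Source B (None/"" both falsy, collapse to "")
def pvEffectiveId (u : List (String × String)) : String :=
  let d := PySem.Dict.mk u
  let a := d.getD "user_id" ""
  if a ≠ "" then a else d.getD "id" ""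

-- enrich(section) in Source B: linear scan over users keeping the last match
def pvEnrichOne (users : List (List (String × String))) (section_ : List (String × String)) : List (String × String) :=
  let secd := PySem.Dict.mk section_
  let instructor_id := secd.getD "instructor_id" ""
  if instructor_id = "" then section_
  else
    match users.foldl (fun m u => if pvEffectiveId u = instructor_id then some u else m) none with
    | none => section_
    | some u =>
        let d := PySem.Dict.mk u
        let full := PySem.Str.strip (d.getD "first_name" "" ++ " " ++ d.getD "last_name" "")
        let email := d.getD "email" ""
        ((secd.insert "instructor_name" (if full ≠ "" then full else email)).insert "instructor_email" email).items

def enrich_sections_with_instructor_data_py_alt (sections : List (List (String × String))) (users : List (List (String × String))) : List (List (String × String)) :=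
  sections.map (pvEnrichOne users)

-- ===== PRECONDITION & SPEC =====
def Spec_enrich_sections_with_instructor_data_py (sections : List (List (String × String))) (users : List (List (String × String))) (out : List (List (String × String))) : Prop := out = enrich_sections_with_instructor_data_py_alt sections users
instance (sections : List (List (String × String))) (users : List (List (String × String))) (out : List (List (String × String))) : Decidable (Spec_enrich_sections_with_instructor_data_py sections users out) := by unfold Spec_enrich_sections_with_instructor_data_py; infer_instance

-- ===== CLAIM (what is proved, stated in full; the proofs are below) =====
def Claim_equal_enrich_sections_with_instructor_data_py : Prop := ∀ (sections : List (List (String × String))) (users : List (List (String × String))), Dom_enrich_sections_with_instructor_data_py sections users → Spec_enrich_sections_with_instructor_data_py sections users (enrich_sections_with_instructor_data_py sections users)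

-- ===== LEMMAS AND PROOFS =====

-- the last-match fold ignores its accumulator as soon as any element matches
theorem lastMatch_foldl_acc (k : String)
    (us : List (List (String × String))) (acc : Option (List (String × String))) :
    us.foldl (fun m u => if pvEffectiveId u = k then some u else m) acc
      = (us.foldl (fun m u => if pvEffectiveId u = k then some u else m) none).or acc := by
  induction us generalizing acc with
  | nil => simp
  | cons u us ih =>
      simp only [List.foldl_cons]
      rw [ih, ih (if pvEffectiveId u = k then some u else none)]
      by_cases h : pvEffectiveId u = k <;> simp [h]

-- the dict lookup in A's instructor_lookup equals B's last-match scan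
theorem lookup_eq_lastMatch (users : List (List (String × String)))
    (d : PySem.Dict String (String × String)) (k : String) (hk : k ≠ "") :
    (users.foldl (fun d u =>
        let user_id := pvUserIdA u
        if user_id ≠ "" then d.insert user_id (pvInfoA u) else d) d).get? k
      = match users.foldl (fun m u => if pvEffectiveId u = k then some u else m) none with
        | some u => some (pvInfoA u)
        | none => d.get? k := by
  induction users generalizing d with
  | nil => simp
  | cons u us ih =>
      simp only [List.foldl_cons]
      rw [ih, lastMatch_foldl_acc k us (if pvEffectiveId u = k then some u else none)]
      cases hm : us.foldl (fun m u => if pvEffectiveId u = k then some u else m) none with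
      | some v => simp
      | none =>
          simp only [Option.none_or]
          have hEff : pvEffectiveId u = pvUserIdA u := rfl
          rw [hEff]
          by_cases h1 : pvUserIdA u = k
          · simp [h1, hk]
          · have h1' : k ≠ pvUserIdA u := fun h => h1 h.symm
            by_cases h2 : pvUserIdA u = ""
            · simp [h2, hk]
            · simp [h1, h1', h2, PySem.Dict.get?_insert]

-- A's per-section body (with the built lookup) equals B's pvEnrichOne
theorem sectionA_eq_enrichOne (users : List (List (String × String))) (sec : List (String × String)) :
    (let instructor_lookup : PySem.Dict String (String × String) :=
      users.foldl (fun d u =>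
        let user_id := pvUserIdA u
        if user_id ≠ "" then d.insert user_id (pvInfoA u) else d) PySem.Dict.empty
     let secd := PySem.Dict.mk sec
     let instructor_id := secd.getD "instructor_id" ""
     if instructor_id ≠ "" then
       match instructor_lookup.get? instructor_id with
       | some instructor =>
           ((secd.insert "instructor_name" instructor.1).insert "instructor_email" instructor.2).items
       | none => sec
     else sec) = pvEnrichOne users sec := by
  simp only [pvEnrichOne]
  by_cases h : PySem.Dict.getD (PySem.Dict.mk sec) "instructor_id" "" = ""
  · simp [h]
  · rw [lookup_eq_lastMatch users PySem.Dict.empty _ h]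
    cases lm : users.foldl (fun m u => if pvEffectiveId u = (PySem.Dict.mk sec).getD "instructor_id" "" then some u else m) none with
    | none => simp [h, PySem.Dict.get?_empty]
    | some u => simp [h, pvInfoA]

theorem enrich_sections_with_instructor_data_py_spec : Claim_equal_enrich_sections_with_instructor_data_py := by
  intro sections users _
  unfold Spec_enrich_sections_with_instructor_data_py
  unfold enrich_sections_with_instructor_data_py enrich_sections_with_instructor_data_py_alt
  rw [PySem.List.foldl_append_singleton_eq_map]
  exact List.map_congr_left (fun s _ => sectionA_eq_enrichOne users s)
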